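-- pv_equiv track=rewrite | github.com/Abhik91/Leet-and-Interview-Codes | digitanagram.py | breaknumintolist
-- ===== SOURCE A (Python) =====
-- def breaknumintolist(num):
-- 	#Break number into list
-- 	#@author - Abhik Dey
-- 	l = []
-- 	while num > 0:
-- 		l.append(num%10)
-- 		num = num // 10
--
-- 	l.sort()
-- 	print (l)
-- 	return l;
-- ===== SOURCE B (Python) =====
-- def breaknumintolist(num):
-- 	#Break number into sorted list of digits via a digit-count array (counting sort)
-- 	counts = [0]*10
-- 	while num > 0:
-- 		counts[num % 10] += 1
-- 		num = num // 10
-- 	l = []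
-- 	for d in range(10):
-- 		l.extend([d] * counts[d])
-- 	print (l)
-- 	return l
-- ===== Notes on version B (the rewrite author's own statement) =====
-- stated objective: alternative
-- what changed: Replaces append-then-comparison-sort with a counting sort: a fixed ten-slot digit-count array filled during extraction, then the sorted list is emitted by scanning the digit values in increasing order.
import Mathlib
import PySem

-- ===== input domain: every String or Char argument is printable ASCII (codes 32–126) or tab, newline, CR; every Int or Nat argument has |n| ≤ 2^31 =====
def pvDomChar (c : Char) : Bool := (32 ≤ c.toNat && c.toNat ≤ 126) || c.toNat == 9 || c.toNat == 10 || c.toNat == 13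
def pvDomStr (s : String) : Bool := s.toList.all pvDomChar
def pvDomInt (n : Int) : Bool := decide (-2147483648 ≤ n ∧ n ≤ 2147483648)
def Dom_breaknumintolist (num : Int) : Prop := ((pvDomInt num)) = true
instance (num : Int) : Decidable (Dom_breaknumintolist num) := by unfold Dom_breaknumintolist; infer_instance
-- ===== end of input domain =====

-- ===== PORT A =====
-- Break a number into a sorted list of its digits; B uses a 10-slot count array
-- (counting sort) instead of append-then-sort. Both Pythons also print the list
-- (a side effect outside the return-value equivalence proved here).

-- while num > 0: l.append(num%10); num = num//10
def pvDigitsA (num : Int) (l : List Int) : List Int :=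
  if 0 < num then
    pvDigitsA (PySem.Int.floordiv num 10) (l ++ [PySem.Int.mod num 10])
  else l
termination_by num.toNat
decreasing_by
  rename_i h
  rw [PySem.Int.floordiv_eq_ediv_of_pos (by omega)]
  omega

def breaknumintolist (num : Int) : List Int :=
  PySem.List.sorted (pvDigitsA num []) (fun x => x) false

-- ===== PORT B =====
-- while num > 0: counts[num % 10] += 1; num = num // 10
def pvCountsB (num : Int) (counts : List Int) : List Int :=
  if 0 < num then
    pvCountsB (PySem.Int.floordiv num 10)
      (PySem.List.pySetD counts (PySem.Int.mod num 10)
        (PySem.List.pyGetD counts (PySem.Int.mod num 10) 0 + 1))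
  else counts
termination_by num.toNat
decreasing_by
  rename_i h
  rw [PySem.Int.floordiv_eq_ediv_of_pos (by omega)]
  omega

-- counts = [0]*10 filled by the while loop; then for d in range(10): l.extend([d]*counts[d])
-- ([d]*counts[d] is exact as replicate-with-toNat: the counts are nonnegative)
def breaknumintolist_alt (num : Int) : List Int :=
  let counts := pvCountsB num (List.replicate 10 0)
  (PySem.List.pyRange 0 10 1).foldl
    (fun l d => l ++ List.replicate (PySem.List.pyGetD counts d 0).toNat d) []

-- ===== PRECONDITION & SPEC =====
def Spec_breaknumintolist (num : Int) (out : List Int) : Prop := out = breaknumintolist_alt num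
instance (num : Int) (out : List Int) : Decidable (Spec_breaknumintolist num out) := by unfold Spec_breaknumintolist; infer_instance

-- ===== CLAIM (what is proved, stated in full; the proofs are below) =====
def Claim_equal_breaknumintolist : Prop := ∀ (num : Int), Dom_breaknumintolist num → Spec_breaknumintolist num (breaknumintolist num)

-- ===== LEMMAS AND PROOFS =====

-- the digit list of num, least significant first
def pvDigits (num : Int) : List Int :=
  if 0 < num then PySem.Int.mod num 10 :: pvDigits (PySem.Int.floordiv num 10) else []
termination_by num.toNat
decreasing_by
  rename_i h
  rw [PySem.Int.floordiv_eq_ediv_of_pos (by omega)]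
  omega

theorem pvDigitsA_eq (num : Int) (l : List Int) : pvDigitsA num l = l ++ pvDigits num := by
  induction num, l using pvDigitsA.induct with
  | case1 num l h ih => rw [pvDigitsA, pvDigits, if_pos h, if_pos h, ih]; simp
  | case2 num l h => rw [pvDigitsA, pvDigits, if_neg h, if_neg h]; simp

-- the count-array update for one digit
def pvStep (c : List Int) (d : Int) : List Int :=
  PySem.List.pySetD c d (PySem.List.pyGetD c d 0 + 1)

theorem pvCountsB_eq (num : Int) (c : List Int) :
    pvCountsB num c = (pvDigits num).foldl pvStep c := by
  induction num, c using pvCountsB.induct with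
  | case1 num c h ih => rw [pvCountsB, pvDigits, if_pos h, if_pos h, ih]; rfl
  | case2 num c h => rw [pvCountsB, pvDigits, if_neg h, if_neg h]; rfl

theorem pvDigits_mem (num : Int) : ∀ d ∈ pvDigits num, 0 ≤ d ∧ d < 10 := by
  induction num using pvDigits.induct with
  | case1 num h ih =>
    rw [pvDigits, if_pos h]
    intro d hd
    rcases List.mem_cons.mp hd with rfl | hd
    · exact ⟨PySem.Int.mod_nonneg _ (by omega), PySem.Int.mod_lt _ (by omega)⟩
    · exact ih d hd
  | case2 num h => rw [pvDigits, if_neg h]; intro d hd; simp at hd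

-- the emitted list of a count array, as a flatMap
def pvOut (c : List Int) : List Int :=
  (PySem.List.pyRange 0 10 1).flatMap (fun d => List.replicate (PySem.List.pyGetD c d 0).toNat d)

def pvGood (c : List Int) : Prop :=
  c.length = 10 ∧ ∀ i : Int, 0 ≤ i → 0 ≤ PySem.List.pyGetD c i 0

theorem pvStep_getD (c : List Int) (d i : Int) (hl : c.length = 10)
    (hd : 0 ≤ d ∧ d < 10) (hi : 0 ≤ i) :
    PySem.List.pyGetD (pvStep c d) i 0 =
      if i = d then PySem.List.pyGetD c d 0 + 1 else PySem.List.pyGetD c i 0 := by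
  unfold pvStep
  rw [PySem.List.pySetD_of_nonneg _ _ hd.1,
      PySem.List.pyGetD_of_nonneg _ _ hi, PySem.List.pyGetD_of_nonneg _ _ hi]
  by_cases h : i = d
  · subst h
    rw [if_pos rfl, PySem.List.pyGetD_of_nonneg _ _ hd.1]
    simp only [List.getD, List.getElem?_set, if_pos (show i.toNat < c.length by omega)]
    rfl
  · rw [if_neg h]
    simp only [List.getD]
    simp [show ¬ d.toNat = i.toNat by omega]

theorem pvStep_good (c : List Int) (d : Int) (hg : pvGood c) (hd : 0 ≤ d ∧ d < 10) :
    pvGood (pvStep c d) := by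
  obtain ⟨hl, hnn⟩ := hg
  refine ⟨by simpa [pvStep] using PySem.List.length_pySetD c d (PySem.List.pyGetD c d 0 + 1) ▸ hl, ?_⟩
  intro i hi
  rw [pvStep_getD c d i hl hd hi]
  split
  · have := hnn d hd.1; omega
  · exact hnn i hi

theorem pvFlat_congr (c c' : List Int) (d : Int)
    (h : ∀ i : Int, 0 ≤ i → i ≠ d → PySem.List.pyGetD c' i 0 = PySem.List.pyGetD c i 0) :
    ∀ (L : List Int), (∀ i ∈ L, 0 ≤ i ∧ i ≠ d) →
      (L.flatMap (fun i => List.replicate (PySem.List.pyGetD c' i 0).toNat i))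
        = L.flatMap (fun i => List.replicate (PySem.List.pyGetD c i 0).toNat i) := by
  intro L
  induction L with
  | nil => intro _; rfl
  | cons x t ih =>
    intro hmem
    have hx := hmem x (by simp)
    simp only [List.flatMap_cons, h x hx.1 hx.2, ih (fun i hi => hmem i (by simp [hi]))]

theorem pvOut_step (c : List Int) (d : Int) (hg : pvGood c) (hd : 0 ≤ d ∧ d < 10) :
    (pvOut (pvStep c d)).Perm (d :: pvOut c) := by
  obtain ⟨hl, hnn⟩ := hg
  have h1 := PySem.List.pyRange_one_append 0 d 10 hd.1 (le_of_lt hd.2)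
  have h2 := PySem.List.pyRange_one_cons (a := d) (b := 10) hd.2
  have hstep := pvStep_getD c d
  have hA := pvFlat_congr c (pvStep c d) d
    (fun i hi hne => by rw [pvStep_getD c d i hl hd hi, if_neg hne])
    (PySem.List.pyRange 0 d 1)
    (fun i hi => by have := PySem.List.mem_pyRange_one.mp hi; exact ⟨this.1, by omega⟩)
  have hB := pvFlat_congr c (pvStep c d) d
    (fun i hi hne => by rw [pvStep_getD c d i hl hd hi, if_neg hne])
    (PySem.List.pyRange (d+1) 10 1)
    (fun i hi => by have := PySem.List.mem_pyRange_one.mp hi; exact ⟨by omega, by omega⟩)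
  have hmid : (PySem.List.pyGetD (pvStep c d) d 0).toNat
      = (PySem.List.pyGetD c d 0).toNat + 1 := by
    rw [pvStep_getD c d d hl hd hd.1, if_pos rfl]
    have := hnn d hd.1; omega
  unfold pvOut
  rw [h1, h2]
  simp only [List.flatMap_append, List.flatMap_cons, hA, hB, hmid, List.replicate_succ]
  simp

theorem pvOut_foldl (ds : List Int) (c : List Int) (hg : pvGood c)
    (hds : ∀ d ∈ ds, 0 ≤ d ∧ d < 10) :
    (pvOut (ds.foldl pvStep c)).Perm (ds ++ pvOut c) := by
  induction ds generalizing c with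
  | nil => simp
  | cons d rest ih =>
    have hd := hds d (by simp)
    have h1 := ih (pvStep c d) (pvStep_good c d hg hd) (fun x hx => hds x (by simp [hx]))
    have h2 := pvOut_step c d hg hd
    exact (h1.trans ((List.Perm.append_left rest h2).trans List.perm_middle)).trans (List.Perm.refl _)

theorem pvFlat_pairwise (f : Int → Nat) :
    ∀ (n : Nat) (a : Int),
      ((PySem.List.pyRange a (a + n) 1).flatMap (fun i => List.replicate (f i) i)).Pairwise (· ≤ ·) := by
  intro n
  induction n with
  | zero => intro a; rw [PySem.List.pyRange_one_eq_nil (by omega)]; simp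
  | succ n ih =>
    intro a
    push_cast
    rw [PySem.List.pyRange_one_cons (by omega : a < a + ((n : Int) + 1))]
    simp only [List.flatMap_cons]
    rw [List.pairwise_append]
    refine ⟨List.pairwise_replicate.mpr (Or.inr le_rfl), ?_, ?_⟩
    · have := ih (a + 1)
      have heq : a + 1 + (n : Int) = a + ((n : Int) + 1) := by ring
      rwa [heq] at this
    · intro x hx y hy
      have hx' := List.eq_of_mem_replicate hx
      subst hx'
      rcases List.mem_flatMap.mp hy with ⟨i, hi, hyi⟩
      have := PySem.List.mem_pyRange_one.mp hi
      have := List.eq_of_mem_replicate hyi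
      omega

theorem pvOut_pairwise (c : List Int) : (pvOut c).Pairwise (· ≤ ·) := by
  have := pvFlat_pairwise (fun i => (PySem.List.pyGetD c i 0).toNat) 10 0
  simpa [pvOut] using this

theorem pvGood_init : pvGood (List.replicate 10 (0 : Int)) := by
  refine ⟨by simp, ?_⟩
  intro i hi
  rw [PySem.List.pyGetD_of_nonneg _ _ hi]
  simp only [List.getD, List.getElem?_replicate]
  split <;> simp

theorem pvOut_init : pvOut (List.replicate 10 (0 : Int)) = [] := by decide

-- ===== VERDICT (by name: the statement is the Claim_ definition above) =====
theorem breaknumintolist_spec : Claim_equal_breaknumintolist := by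
  intro num _
  unfold Spec_breaknumintolist breaknumintolist breaknumintolist_alt
  rw [pvDigitsA_eq, List.nil_append, pvCountsB_eq, PySem.List.foldl_append_eq_flatMap,
      List.nil_append]
  have hperm := pvOut_foldl (pvDigits num) (List.replicate 10 0) pvGood_init (pvDigits_mem num)
  rw [pvOut_init, List.append_nil] at hperm
  show PySem.List.sorted (pvDigits num) (fun x => x) false
      = pvOut ((pvDigits num).foldl pvStep (List.replicate 10 0))
  exact (PySem.List.sorted_id_eq_of_perm_of_pairwise _ _ hperm (pvOut_pairwise _))
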